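-- pv_equiv track=rewrite | github.com/AliNormohammmadzadeh/DSA | Data structure & Algorithm/Find the longest continuous sequence length.py | findMaxSublistLength
-- ===== SOURCE A (Python) =====
-- def findMaxSublistLength(X, Y):
--
--     # create an empty dictionary
--     d = {}
--
--     # to handle the case when the required sequence starts from index 0
--     d[0] = -1
--
--     # stores length of the longest continuous sequence
--     result = 0
--
--     # `sum_x` and `sum_y` stores the sum of elements of `X` and `Y`,
--     # respectively, till the current index
--     sum_x = sum_y = 0
--
--     # traverse both lists simultaneously
--     for i in range(len(X)):
--
--         # update `sum_x` and `sum_y`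
--         sum_x += X[i]
--         sum_y += Y[i]
--
--         # calculate the difference between the sum of elements in two lists
--         diff = sum_x - sum_y
--
--         # if the difference is seen for the first time, store the
--         # difference and current index in a dictionary
--         if diff not in d:
--             d[diff] = i
--
--         # if the difference is seen before, then update the result
--         else:
--             result = max(result, i - d[diff])
--
--     return result
-- ===== SOURCE B (Python) =====
-- def findMaxSublistLength(X, Y):
--     # Brute force: difference array, then scan every start index with a running sum.
--     Z = [X[i] - Y[i] for i in range(len(X))]
--     best = 0
--     for l in range(len(Z)):
--         s = 0
--         for r in range(l, len(Z)):
--             s += Z[r]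
--             if s == 0:
--                 best = max(best, r - l + 1)
--     return best
-- ===== Notes on version B (the rewrite author's own statement) =====
-- stated objective: alternative
-- what changed: Replaced the single-pass hashmap of first-seen prefix differences with a brute-force nested scan: build the difference array Z=X[i]-Y[i], then for every start index accumulate a running sum and record the longest window summing to zero.
import Mathlib
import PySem

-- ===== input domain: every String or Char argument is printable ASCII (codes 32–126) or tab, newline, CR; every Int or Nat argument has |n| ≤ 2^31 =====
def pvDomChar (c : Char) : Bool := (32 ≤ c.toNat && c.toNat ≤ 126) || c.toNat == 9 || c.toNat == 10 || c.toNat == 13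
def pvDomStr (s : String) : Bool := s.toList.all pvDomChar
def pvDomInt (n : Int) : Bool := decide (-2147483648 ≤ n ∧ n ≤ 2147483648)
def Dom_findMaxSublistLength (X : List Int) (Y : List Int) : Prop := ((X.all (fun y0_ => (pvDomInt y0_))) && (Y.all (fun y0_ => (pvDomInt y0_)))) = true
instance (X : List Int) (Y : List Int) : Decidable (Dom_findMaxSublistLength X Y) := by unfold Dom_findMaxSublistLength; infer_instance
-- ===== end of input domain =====

-- B replaces A's single-pass first-seen-difference hashmap with a brute-force nested
-- scan of the difference array (alternative algorithm, not faster).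

-- ===== PORT A =====
def findMaxSublistLength (X : List Int) (Y : List Int) : Int :=
  -- d = {0: -1}; result = 0; sum_x = sum_y = 0; for i in range(len(X)): ...
  (((PySem.List.pyRange 0 (X.length : Int) 1).foldl
    (fun (s : PySem.Dict Int Int × Int × Int × Int) (i : Int) =>
      let sum_x := s.2.2.1 + PySem.List.pyGetD X i 0
      let sum_y := s.2.2.2 + PySem.List.pyGetD Y i 0   -- Y[i]: IndexError when Y is shorter, excluded by Pre_
      let diff := sum_x - sum_y
      if s.1.contains diff = false then
        (s.1.insert diff i, s.2.1, sum_x, sum_y)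
      else
        (s.1, max s.2.1 (i - s.1.getD diff 0), sum_x, sum_y))
    ((PySem.Dict.empty).insert 0 (-1), 0, 0, 0)) : PySem.Dict Int Int × Int × Int × Int).2.1

-- ===== PORT B =====
def findMaxSublistLength_alt (X : List Int) (Y : List Int) : Int :=
  -- Z = [X[i] - Y[i] for i in range(len(X))]
  let Z := (PySem.List.pyRange 0 (X.length : Int) 1).map
    (fun i => PySem.List.pyGetD X i 0 - PySem.List.pyGetD Y i 0)
  -- for l in range(len(Z)): s = 0; for r in range(l, len(Z)): s += Z[r]; if s == 0: best = max(best, r-l+1)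
  (PySem.List.pyRange 0 (Z.length : Int) 1).foldl
    (fun best l =>
      ((PySem.List.pyRange l (Z.length : Int) 1).foldl
        (fun (p : Int × Int) r =>
          (p.1 + PySem.List.pyGetD Z r 0,
           if p.1 + PySem.List.pyGetD Z r 0 = 0 then max p.2 (r - l + 1) else p.2))
        (0, best)).2)
    0

-- ===== PRECONDITION & SPEC =====
-- Pre_ excludes only inputs where A raises IndexError (Y shorter than X).
def Pre_findMaxSublistLength (X : List Int) (Y : List Int) : Prop := X.length ≤ Y.length
instance (X : List Int) (Y : List Int) : Decidable (Pre_findMaxSublistLength X Y) := by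
  unfold Pre_findMaxSublistLength; infer_instance
def pvWitness_findMaxSublistLength : List Int × List Int := ([1, 2, -3, 2], [2, 1, -3, 0])

def Spec_findMaxSublistLength (X : List Int) (Y : List Int) (out : Int) : Prop := out = findMaxSublistLength_alt X Y
instance (X : List Int) (Y : List Int) (out : Int) : Decidable (Spec_findMaxSublistLength X Y out) := by unfold Spec_findMaxSublistLength; infer_instance

-- ===== CLAIM (what is proved, stated in full; the proofs are below) =====
def Claim_equal_findMaxSublistLength : Prop := ∀ (X : List Int) (Y : List Int), Dom_findMaxSublistLength X Y → Pre_findMaxSublistLength X Y → Spec_findMaxSublistLength X Y (findMaxSublistLength X Y)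

-- ===== LEMMAS AND PROOFS =====

-- prefix sums: scanP s Z = [s+Z[0], s+Z[0]+Z[1], ...]
def scanP (s : Int) : List Int → List Int
  | [] => []
  | z :: zs => (s + z) :: scanP (s + z) zs

-- A's loop, as structural recursion over the zipped pairs with the running index.
def loopA (st : PySem.Dict Int Int × Int × Int × Int) :
    List (Int × Int) → Int → PySem.Dict Int Int × Int × Int × Int
  | [], _ => st
  | p :: ps, i =>
    let sum_x := st.2.2.1 + p.1
    let sum_y := st.2.2.2 + p.2
    let diff := sum_x - sum_y
    if st.1.contains diff = false then
      loopA (st.1.insert diff i, st.2.1, sum_x, sum_y) ps (i + 1)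
    else
      loopA (st.1, max st.2.1 (i - st.1.getD diff 0), sum_x, sum_y) ps (i + 1)

-- prefix sum of Z up to k, and the "balanced pair" predicate both programs maximise over
def preZ (Z : List Int) (k : Nat) : Int := (Z.take k).sum

def GoodZ (Z : List Int) (l j : Nat) : Prop := l < j ∧ j ≤ Z.length ∧ preZ Z l = preZ Z j

theorem scanP_length (s : Int) (Z : List Int) : (scanP s Z).length = Z.length := by
  induction Z generalizing s with
  | nil => rfl
  | cons z zs ih => simp [scanP, ih]

-- value of the prefix list at position j
theorem scanP_getElem? (Z : List Int) (s : Int) (j : Nat) (hj : j ≤ Z.length) :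
    (s :: scanP s Z)[j]? = some (s + (Z.take j).sum) := by
  induction Z generalizing s j with
  | nil =>
    have : j = 0 := by simpa using hj
    subst this; simp
  | cons z zs ih =>
    cases j with
    | zero => simp
    | succ j =>
      have := ih (s + z) j (by simpa using hj)
      simpa [scanP, add_assoc] using this

theorem P_getElem (Z : List Int) (k : Nat) (hk : k ≤ Z.length) :
    ((0:Int) :: scanP 0 Z)[k]'(by simp [scanP_length]; omega) = preZ Z k := by
  have h := scanP_getElem? Z 0 k hk
  rw [List.getElem?_eq_getElem (by simp [scanP_length]; omega)] at h
  simpa [preZ] using Option.some.inj h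

theorem index?_append_single (l : List Int) (c v : Int) :
    PySem.List.index? (l ++ [c]) v =
      if v ∈ l then PySem.List.index? l v
      else if v = c then some l.length else none := by
  by_cases hv : v ∈ l
  · rw [PySem.List.index?_append_of_mem [c] hv, if_pos hv]
  · by_cases hc : v = c
    · subst hc
      rw [if_neg hv, if_pos rfl]
      exact PySem.List.index?_append_singleton_self l v hv
    · rw [if_neg hv, if_neg hc, PySem.List.index?_eq_none_iff]
      simp [hv, hc]

theorem index?_first_split (l rest : List Int) (v : Int) (hv : v ∉ l) :
    PySem.List.index? (l ++ v :: rest) v = some l.length := by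
  have : l ++ v :: rest = (l ++ [v]) ++ rest := by simp
  rw [this, PySem.List.index?_append_of_mem rest (by simp : v ∈ l ++ [v])]
  exact PySem.List.index?_append_singleton_self l v hv

-- the first occurrence of P[l] in P sits at some t ≤ l, and P[t] = P[l]
theorem first_idx (P : List Int) (l : Nat) (hl : l < P.length) :
    ∃ t, PySem.List.index? P (P[l]) = some t ∧ t ≤ l ∧
      ∃ (ht : t < P.length), P[t] = P[l] := by
  have hlen : (P.take (l+1)).length = l + 1 := by simp; omega
  have hmem : P[l] ∈ P.take (l+1) := by
    have hg : (P.take (l+1))[l]'(by omega) = P[l] := List.getElem_take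
    exact hg ▸ List.getElem_mem _
  have hsome : (PySem.List.index? (P.take (l+1)) P[l]).isSome :=
    (PySem.List.index?_isSome_iff _ _).2 hmem
  obtain ⟨t, ht⟩ := Option.isSome_iff_exists.mp hsome
  obtain ⟨htlt, htv, _⟩ := PySem.List.getElem_of_index?_eq_some ht
  have htl : t ≤ l := by omega
  have hsplit : ∀ (v : Int), v ∈ P.take (l+1) →
      PySem.List.index? P v = PySem.List.index? (P.take (l+1)) v := by
    intro v hv
    conv_lhs => rw [← List.take_append_drop (l+1) P]
    rw [PySem.List.index?_append_of_mem _ hv]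
  have hPidx : PySem.List.index? P (P[l]) = some t := by
    rw [hsplit _ hmem, ht]
  refine ⟨t, hPidx, htl, by omega, ?_⟩
  have : (P.take (l+1))[t] = P[t]'(by omega) := List.getElem_take
  rw [← this, htv]

-- bridge: A's foldl over range(len X) = loopA over the zipped suffix
theorem bridgeA (X Y : List Int) (hlen : X.length ≤ Y.length) :
    ∀ (m j : Nat) (st : PySem.Dict Int Int × Int × Int × Int), j + m = X.length →
    (PySem.List.pyRange (j : Int) (X.length : Int) 1).foldl
      (fun (s : PySem.Dict Int Int × Int × Int × Int) (i : Int) =>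
        let sum_x := s.2.2.1 + PySem.List.pyGetD X i 0
        let sum_y := s.2.2.2 + PySem.List.pyGetD Y i 0
        let diff := sum_x - sum_y
        if s.1.contains diff = false then
          (s.1.insert diff i, s.2.1, sum_x, sum_y)
        else
          (s.1, max s.2.1 (i - s.1.getD diff 0), sum_x, sum_y)) st
    = loopA st ((X.zip Y).drop j) (j : Int) := by
  intro m
  induction m with
  | zero =>
    intro j st hj
    have hjn : j = X.length := by omega
    subst hjn
    rw [PySem.List.pyRange_one_eq_nil (le_refl _),
      List.drop_eq_nil_of_le (by simp)]
    rfl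
  | succ m ih =>
    intro j st hj
    have hjlt : j < X.length := by omega
    have hjY : j < Y.length := by omega
    have hjz : j < (X.zip Y).length := by simp; omega
    rw [PySem.List.pyRange_one_cons (by exact_mod_cast hjlt), List.foldl_cons,
      List.drop_eq_getElem_cons hjz]
    have hX : PySem.List.pyGetD X ((j : Nat) : Int) 0 = X[j] := by
      rw [PySem.List.pyGetD_natCast]; exact List.getD_eq_getElem X 0 hjlt
    have hY : PySem.List.pyGetD Y ((j : Nat) : Int) 0 = Y[j] := by
      rw [PySem.List.pyGetD_natCast]; exact List.getD_eq_getElem Y 0 hjY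
    have hcast : ((j : Int) + 1) = (((j + 1 : Nat) : Int)) := by push_cast; ring
    simp only [loopA, hX, hY, List.getElem_zip]
    rw [hcast, ih (j + 1) _ (by omega)]
    by_cases hc : st.1.contains (st.2.2.1 + X[j] - (st.2.2.2 + Y[j])) = false <;>
      simp [hc]

-- main invariant lemma: continuing A from step j equals continuing the index scan from k = j+1
theorem mainLoop (W : List (Int × Int)) (P : List Int)
    (hP : P = 0 :: scanP 0 (W.map (fun p => p.1 - p.2))) :
    ∀ (m j : Nat) (d : PySem.Dict Int Int) (res sx sy : Int),
    j + m = W.length →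
    sx - sy = ((W.map (fun p => p.1 - p.2)).take j).sum →
    0 ≤ res →
    (∀ v, d.get? v = (PySem.List.index? (P.take (j + 1)) v).map (fun t => (t : Int) - 1)) →
    (loopA (d, res, sx, sy) (W.drop j) (j : Int)).2.1
      = (PySem.List.pyRange ((j : Int) + 1) ((W.length : Int) + 1) 1).foldl
          (fun best k =>
            max best (k - (((PySem.List.index? P (PySem.List.pyGetD P k 0)).map Int.ofNat).getD 0)))
          res := by
  intro m
  induction m with
  | zero =>
    intro j d res sx sy hj _ _ _
    have hjn : j = W.length := by omega
    subst hjn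
    rw [List.drop_eq_nil_of_le (le_refl _), PySem.List.pyRange_one_eq_nil (le_refl _)]
    rfl
  | succ m ih =>
    intro j d res sx sy hj hs hres hd
    have hjlt : j < W.length := by omega
    have hZlen : (W.map (fun p => p.1 - p.2)).length = W.length := by simp
    have hPlen : P.length = W.length + 1 := by rw [hP]; simp [scanP_length]
    have hzj : (W.map (fun p => p.1 - p.2))[j]'(by omega) = (W[j]'hjlt).1 - (W[j]'hjlt).2 := by
      simp
    have hsum : ((W.map (fun p => p.1 - p.2)).take (j+1)).sum
        = ((W.map (fun p => p.1 - p.2)).take j).sum + (W.map (fun p => p.1 - p.2))[j]'(by omega) := by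
      rw [List.take_add_one, List.getElem?_eq_getElem (by omega)]
      simp
    have hPj1 : P[j+1]? = some (((W.map (fun p => p.1 - p.2)).take (j+1)).sum) := by
      rw [hP]
      have := scanP_getElem? (W.map (fun p => p.1 - p.2)) 0 (j+1) (by omega)
      simpa using this
    have hPj1' : P[j+1]'(by omega) = ((W.map (fun p => p.1 - p.2)).take (j+1)).sum := by
      have h2 := List.getElem?_eq_getElem (l := P) (i := j+1) (by omega)
      rw [hPj1] at h2
      exact (Option.some.inj h2).symm
    have htake1len : (P.take (j+1)).length = j+1 := by
      simp [hPlen]; omega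
    have htake2 : P.take (j+2) = P.take (j+1) ++ [((W.map (fun p => p.1 - p.2)).take (j+1)).sum] := by
      rw [List.take_add_one, hPj1]; rfl
    have hsplitP : P = P.take (j+1) ++ ((W.map (fun p => p.1 - p.2)).take (j+1)).sum :: P.drop (j+2) := by
      conv_lhs => rw [← List.take_append_drop (j+1) P]
      congr 1
      rw [List.drop_eq_getElem_cons (by omega), hPj1']
    rw [List.drop_eq_getElem_cons hjlt]
    have hrange : PySem.List.pyRange ((j:Int)+1) ((W.length : Int)+1)
        = ((j:Int)+1) :: PySem.List.pyRange (((j+1:Nat):Int)+1) ((W.length:Int)+1) := by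
      have h3 := PySem.List.pyRange_one_cons (a := (j:Int)+1) (b := (W.length:Int)+1)
        (by omega)
      rw [h3]
      have h3b : ((j:Int)+1)+1 = ((j+1:Nat):Int)+1 := by push_cast; ring
      rw [h3b]
    rw [hrange, List.foldl_cons]
    simp only [loopA]
    have hdiff : sx + (W[j]'hjlt).1 - (sy + (W[j]'hjlt).2)
        = ((W.map (fun p => p.1 - p.2)).take (j+1)).sum := by
      rw [hsum, ← hs, hzj]; ring
    have hPget : PySem.List.pyGetD P ((j:Int)+1) 0 = ((W.map (fun p => p.1 - p.2)).take (j+1)).sum := by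
      have h4 : ((j:Int)+1) = ((j+1 : Nat) : Int) := by push_cast; ring
      rw [h4, PySem.List.pyGetD_natCast, List.getD_eq_getElem _ _ (by omega), hPj1']
    rw [hdiff]
    cases hidx : PySem.List.index? (P.take (j+1)) (((W.map (fun p => p.1 - p.2)).take (j+1)).sum) with
    | none =>
      have hvnot : ((W.map (fun p => p.1 - p.2)).take (j+1)).sum ∉ P.take (j+1) :=
        (PySem.List.index?_eq_none_iff _ _).1 hidx
      have hcont : d.contains (((W.map (fun p => p.1 - p.2)).take (j+1)).sum) = false := by
        rw [PySem.Dict.contains_eq_isSome_get?, hd _, hidx]; rfl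
      have hidxP : PySem.List.index? P (((W.map (fun p => p.1 - p.2)).take (j+1)).sum) = some (j+1) := by
        have h5 := index?_first_split (P.take (j+1)) (P.drop (j+2)) _ hvnot
        rw [← hsplitP, htake1len] at h5
        exact h5
      have hgr : max res (((j:Int)+1) - (((PySem.List.index? P (PySem.List.pyGetD P ((j:Int)+1) 0)).map Int.ofNat).getD 0)) = res := by
        rw [hPget, hidxP]
        simp only [Option.map_some, Option.getD_some]
        have h0 : (j:Int)+1 - Int.ofNat (j+1) = 0 := by
          simp only [Int.ofNat_eq_natCast]; push_cast; ring
        rw [h0, max_eq_left hres]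
      rw [hgr]
      simp only [hcont]
      have hcast : ((j:Int)+1) = ((j+1:Nat):Int) := by push_cast; ring
      rw [hcast]
      apply ih (j+1) _ res _ _ (by omega) (by linarith [hdiff]) hres
      intro u
      rw [show j+1+1 = j+2 from rfl, htake2, index?_append_single, PySem.Dict.get?_insert]
      by_cases hu : u ∈ P.take (j+1)
      · have hne : u ≠ ((W.map (fun p => p.1 - p.2)).take (j+1)).sum := fun h => hvnot (h ▸ hu)
        rw [if_neg hne, if_pos hu, hd u]
      · rw [if_neg hu]
        by_cases huv : u = ((W.map (fun p => p.1 - p.2)).take (j+1)).sum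
        · rw [if_pos huv, if_pos huv, htake1len]
          simp
        · rw [if_neg huv, if_neg huv, hd u, (PySem.List.index?_eq_none_iff _ _).2 hu]
    | some t =>
      have hvmem : ((W.map (fun p => p.1 - p.2)).take (j+1)).sum ∈ P.take (j+1) := by
        rw [← PySem.List.index?_isSome_iff, hidx]; rfl
      have hcont : d.contains (((W.map (fun p => p.1 - p.2)).take (j+1)).sum) = true := by
        rw [PySem.Dict.contains_eq_isSome_get?, hd _, hidx]; rfl
      have hgetD : d.getD (((W.map (fun p => p.1 - p.2)).take (j+1)).sum) 0 = (t:Int) - 1 := by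
        rw [PySem.Dict.getD_eq_get?_getD, hd _, hidx]; rfl
      have hidxP : PySem.List.index? P (((W.map (fun p => p.1 - p.2)).take (j+1)).sum) = some t := by
        have h6 := PySem.List.index?_append_of_mem
          ((((W.map (fun p => p.1 - p.2)).take (j+1)).sum) :: P.drop (j+2)) hvmem
        rw [← hsplitP] at h6
        rw [h6, hidx]
      have hgr : max res (((j:Int)+1) - (((PySem.List.index? P (PySem.List.pyGetD P ((j:Int)+1) 0)).map Int.ofNat).getD 0)) = max res ((j:Int) - ((t:Int) - 1)) := by
        rw [hPget, hidxP]
        simp only [Option.map_some, Option.getD_some, Int.ofNat_eq_natCast]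
        congr 1
        ring
      rw [hgr]
      simp only [hcont]
      rw [hgetD]
      have hcast : ((j:Int)+1) = ((j+1:Nat):Int) := by push_cast; ring
      rw [hcast]
      apply ih (j+1) d _ _ _ (by omega) (by linarith [hdiff])
        (le_trans hres (le_max_left _ _))
      intro u
      rw [show j+1+1 = j+2 from rfl, htake2, index?_append_single]
      by_cases hu : u ∈ P.take (j+1)
      · rw [if_pos hu, hd u]
      · have hne : u ≠ ((W.map (fun p => p.1 - p.2)).take (j+1)).sum := fun h => hu (h ▸ hvmem)
        rw [if_neg hu, if_neg hne, hd u, (PySem.List.index?_eq_none_iff _ _).2 hu]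

-- A equals the index-scan fold over the prefix list P
theorem A_eq_fold (X Y : List Int) (hPre : X.length ≤ Y.length) :
    findMaxSublistLength X Y
      = (PySem.List.pyRange 1 (((X.zip Y).length : Int) + 1) 1).foldl
          (fun best k =>
            max best (k - (((PySem.List.index?
              ((0:Int) :: scanP 0 ((X.zip Y).map (fun p => p.1 - p.2)))
              (PySem.List.pyGetD ((0:Int) :: scanP 0 ((X.zip Y).map (fun p => p.1 - p.2))) k 0)).map Int.ofNat).getD 0)))
          0 := by
  unfold findMaxSublistLength
  have hA := bridgeA X Y hPre X.length 0
    ((PySem.Dict.empty.insert 0 (-1)), 0, 0, 0) (by omega)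
  simp only [Nat.cast_zero, List.drop_zero] at hA
  rw [hA]
  have hmain := mainLoop (X.zip Y) _ rfl (X.zip Y).length 0
    (PySem.Dict.empty.insert 0 (-1)) 0 0 0 (by omega) (by simp) (le_refl 0) ?_
  · simp only [Nat.cast_zero, List.drop_zero, zero_add] at hmain
    exact hmain
  · intro u
    have ht1 : (((0:Int) :: scanP 0 ((X.zip Y).map (fun p => p.1 - p.2))).take 1) = [0] := by
      simp
    rw [ht1]
    by_cases hu : u = 0
    · subst hu
      rw [PySem.List.index?_cons_self, PySem.Dict.get?_insert_self]
      rfl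
    · rw [(PySem.List.index?_eq_none_iff _ _).2 (by simp [hu]),
        PySem.Dict.get?_insert, if_neg hu, PySem.Dict.get?_empty]
      rfl

-- characterisation of the index-scan fold: ≥ every balanced pair, attained at one (or 0)
theorem F_char (Z : List Int) :
    ∀ (m j : Nat) (b : Int), j + m = Z.length + 1 → 1 ≤ j →
    b ≤ (PySem.List.pyRange (j:Int) ((Z.length:Int)+1) 1).foldl
          (fun best k =>
            max best (k - (((PySem.List.index? ((0:Int) :: scanP 0 Z)
              (PySem.List.pyGetD ((0:Int) :: scanP 0 Z) k 0)).map Int.ofNat).getD 0))) b ∧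
    (∀ l k : Nat, j ≤ k → GoodZ Z l k →
      (k:Int) - l ≤ (PySem.List.pyRange (j:Int) ((Z.length:Int)+1) 1).foldl
          (fun best k =>
            max best (k - (((PySem.List.index? ((0:Int) :: scanP 0 Z)
              (PySem.List.pyGetD ((0:Int) :: scanP 0 Z) k 0)).map Int.ofNat).getD 0))) b) ∧
    ((PySem.List.pyRange (j:Int) ((Z.length:Int)+1) 1).foldl
          (fun best k =>
            max best (k - (((PySem.List.index? ((0:Int) :: scanP 0 Z)
              (PySem.List.pyGetD ((0:Int) :: scanP 0 Z) k 0)).map Int.ofNat).getD 0))) b = b ∨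
     (PySem.List.pyRange (j:Int) ((Z.length:Int)+1) 1).foldl
          (fun best k =>
            max best (k - (((PySem.List.index? ((0:Int) :: scanP 0 Z)
              (PySem.List.pyGetD ((0:Int) :: scanP 0 Z) k 0)).map Int.ofNat).getD 0))) b = 0 ∨
     ∃ l k : Nat, GoodZ Z l k ∧
       (PySem.List.pyRange (j:Int) ((Z.length:Int)+1) 1).foldl
          (fun best k =>
            max best (k - (((PySem.List.index? ((0:Int) :: scanP 0 Z)
              (PySem.List.pyGetD ((0:Int) :: scanP 0 Z) k 0)).map Int.ofNat).getD 0))) b = (k:Int) - l) := by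
  intro m
  induction m with
  | zero =>
    intro j b hj _
    have hjn : j = Z.length + 1 := by omega
    rw [PySem.List.pyRange_one_eq_nil (by omega), List.foldl_nil]
    refine ⟨le_refl _, ?_, Or.inl rfl⟩
    intro l k hk hg
    obtain ⟨_, hkn, _⟩ := hg
    omega
  | succ m ih =>
    intro j b hj hj1
    have hjlt : j < Z.length + 1 := by omega
    have hPlen : ((0:Int) :: scanP 0 Z).length = Z.length + 1 := by simp [scanP_length]
    rw [show PySem.List.pyRange (j:Int) ((Z.length:Int)+1) 1
        = (j:Int) :: PySem.List.pyRange (((j+1:Nat):Int)) ((Z.length:Int)+1) 1 by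
      rw [PySem.List.pyRange_one_cons (by omega)]; push_cast; ring_nf]
    rw [List.foldl_cons]
    have hget : PySem.List.pyGetD ((0:Int) :: scanP 0 Z) ((j:Nat):Int) 0
        = ((0:Int) :: scanP 0 Z)[j]'(by omega) := by
      rw [PySem.List.pyGetD_natCast]; exact List.getD_eq_getElem _ 0 (by omega)
    obtain ⟨t, hidx, htj, htlt, htv⟩ := first_idx ((0:Int) :: scanP 0 Z) j (by omega)
    have hstep : max b ((j:Int) - (((PySem.List.index? ((0:Int) :: scanP 0 Z)
        (PySem.List.pyGetD ((0:Int) :: scanP 0 Z) ((j:Nat):Int) 0)).map Int.ofNat).getD 0))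
        = max b ((j:Int) - t) := by
      rw [hget, hidx]; simp
    rw [hstep]
    obtain ⟨iha, ihb, ihc⟩ := ih (j+1) (max b ((j:Int) - t)) (by omega) (by omega)
    refine ⟨le_trans (le_max_left _ _) iha, ?_, ?_⟩
    · intro l k hk hg
      rcases Nat.eq_or_lt_of_le hk with hkj | hkj
      · -- k = j: first occurrence t of P[j] satisfies t ≤ l
        have hkj2 : k = j := hkj.symm
        subst hkj2
        obtain ⟨hlk, hkn, hpre⟩ := hg
        have hlP : ((0:Int) :: scanP 0 Z)[l]'(by omega) = ((0:Int) :: scanP 0 Z)[k]'(by omega) := by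
          rw [P_getElem Z l (by omega), P_getElem Z k hkn]; exact hpre
        obtain ⟨t', hidx', htl', _, _⟩ := first_idx ((0:Int) :: scanP 0 Z) l (by omega)
        rw [hlP, hidx] at hidx'
        have htt : t = t' := Option.some.inj hidx'
        have : (k:Int) - l ≤ (k:Int) - t := by
          have : (t:Int) ≤ l := by omega
          omega
        exact le_trans this (le_trans (le_max_right _ _) iha)
      · exact ihb l k hkj hg
    · rcases ihc with h | h | h
      · rw [h]
        rcases max_choice b ((j:Int) - t) with hm | hm
        · exact Or.inl hm
        · rcases Nat.eq_or_lt_of_le htj with htj' | htj'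
          · subst htj'; rw [hm]
            exact Or.inr (Or.inl (by omega))
          · refine Or.inr (Or.inr ⟨t, j, ⟨htj', by omega, ?_⟩, by omega⟩)
            have := P_getElem Z t (by omega)
            have h2 := P_getElem Z j (by omega)
            rw [← this, ← h2, htv]
      · exact Or.inr (Or.inl h)
      · exact Or.inr (Or.inr h)

-- characterisation of B's inner scan from start l, position r, running sum pre r - pre l
theorem inner_char (Z : List Int) (l : Nat) :
    ∀ (m r : Nat) (b : Int), r + m = Z.length → l ≤ r →
    b ≤ ((PySem.List.pyRange (r:Int) (Z.length:Int) 1).foldl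
          (fun (p : Int × Int) rr =>
            (p.1 + PySem.List.pyGetD Z rr 0,
             if p.1 + PySem.List.pyGetD Z rr 0 = 0 then max p.2 (rr - (l:Int) + 1) else p.2))
          (preZ Z r - preZ Z l, b)).2 ∧
    (∀ k : Nat, r < k → k ≤ Z.length → preZ Z k = preZ Z l →
      (k:Int) - l ≤ ((PySem.List.pyRange (r:Int) (Z.length:Int) 1).foldl
          (fun (p : Int × Int) rr =>
            (p.1 + PySem.List.pyGetD Z rr 0,
             if p.1 + PySem.List.pyGetD Z rr 0 = 0 then max p.2 (rr - (l:Int) + 1) else p.2))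
          (preZ Z r - preZ Z l, b)).2) ∧
    (((PySem.List.pyRange (r:Int) (Z.length:Int) 1).foldl
          (fun (p : Int × Int) rr =>
            (p.1 + PySem.List.pyGetD Z rr 0,
             if p.1 + PySem.List.pyGetD Z rr 0 = 0 then max p.2 (rr - (l:Int) + 1) else p.2))
          (preZ Z r - preZ Z l, b)).2 = b ∨
     ∃ k : Nat, l < k ∧ k ≤ Z.length ∧ preZ Z k = preZ Z l ∧
       ((PySem.List.pyRange (r:Int) (Z.length:Int) 1).foldl
          (fun (p : Int × Int) rr =>
            (p.1 + PySem.List.pyGetD Z rr 0,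
             if p.1 + PySem.List.pyGetD Z rr 0 = 0 then max p.2 (rr - (l:Int) + 1) else p.2))
          (preZ Z r - preZ Z l, b)).2 = (k:Int) - l) := by
  intro m
  induction m with
  | zero =>
    intro r b hr _
    have hrn : r = Z.length := by omega
    rw [PySem.List.pyRange_one_eq_nil (by omega), List.foldl_nil]
    exact ⟨le_refl _, fun k hk hkn _ => by omega, Or.inl rfl⟩
  | succ m ih =>
    intro r b hr hlr
    have hrlt : r < Z.length := by omega
    rw [show PySem.List.pyRange (r:Int) (Z.length:Int) 1
        = (r:Int) :: PySem.List.pyRange (((r+1:Nat):Int)) (Z.length:Int) 1 by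
      rw [PySem.List.pyRange_one_cons (by omega)]; push_cast; ring_nf]
    rw [List.foldl_cons]
    have hget : PySem.List.pyGetD Z ((r:Nat):Int) 0 = Z[r]'hrlt := by
      rw [PySem.List.pyGetD_natCast]; exact List.getD_eq_getElem Z 0 hrlt
    have hsum : preZ Z r - preZ Z l + Z[r]'hrlt = preZ Z (r+1) - preZ Z l := by
      have : preZ Z (r+1) = preZ Z r + Z[r]'hrlt := by
        unfold preZ
        rw [List.sum_take_succ]
      omega
    by_cases hz : preZ Z (r+1) - preZ Z l = 0
    · -- sum becomes 0: best := max b (r - l + 1)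
      have hstep : ((preZ Z r - preZ Z l + PySem.List.pyGetD Z ((r:Nat):Int) 0,
          if preZ Z r - preZ Z l + PySem.List.pyGetD Z ((r:Nat):Int) 0 = 0
          then max b (((r:Nat):Int) - (l:Int) + 1) else b) : Int × Int)
          = (preZ Z (r+1) - preZ Z l, max b (((r+1:Nat):Int) - (l:Int))) := by
        rw [hget, hsum, if_pos hz]
        push_cast; ring_nf
      rw [hstep]
      obtain ⟨iha, ihb, ihc⟩ := ih (r+1) (max b (((r+1:Nat):Int) - (l:Int))) (by omega) (by omega)
      refine ⟨le_trans (le_max_left _ _) iha, ?_, ?_⟩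
      · intro k hk hkn hkp
        rcases Nat.eq_or_lt_of_le (Nat.succ_le_of_lt hk) with hk' | hk'
        · subst hk'
          exact le_trans (le_max_right _ _) iha
        · exact ihb k hk' hkn hkp
      · rcases ihc with h | h
        · rw [h]
          rcases max_choice b (((r+1:Nat):Int) - (l:Int)) with hm | hm
          · exact Or.inl hm
          · exact Or.inr ⟨r+1, by omega, by omega, sub_eq_zero.mp hz, hm⟩
        · exact Or.inr h
    · -- sum nonzero: best unchanged
      have hstep : ((preZ Z r - preZ Z l + PySem.List.pyGetD Z ((r:Nat):Int) 0,
          if preZ Z r - preZ Z l + PySem.List.pyGetD Z ((r:Nat):Int) 0 = 0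
          then max b (((r:Nat):Int) - (l:Int) + 1) else b) : Int × Int)
          = (preZ Z (r+1) - preZ Z l, b) := by
        rw [hget, hsum, if_neg hz]
      rw [hstep]
      obtain ⟨iha, ihb, ihc⟩ := ih (r+1) b (by omega) (by omega)
      refine ⟨iha, ?_, ihc⟩
      intro k hk hkn hkp
      rcases Nat.eq_or_lt_of_le (Nat.succ_le_of_lt hk) with hk' | hk'
      · exfalso; apply hz; rw [← hk'] at hkp; exact sub_eq_zero.mpr hkp
      · exact ihb k hk' hkn hkp

-- characterisation of B's outer loop
theorem outer_char (Z : List Int) :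
    ∀ (m l : Nat) (b : Int), l + m = Z.length →
    b ≤ (PySem.List.pyRange (l:Int) (Z.length:Int) 1).foldl
          (fun best ll =>
            ((PySem.List.pyRange ll (Z.length:Int) 1).foldl
              (fun (p : Int × Int) rr =>
                (p.1 + PySem.List.pyGetD Z rr 0,
                 if p.1 + PySem.List.pyGetD Z rr 0 = 0 then max p.2 (rr - ll + 1) else p.2))
              (0, best)).2) b ∧
    (∀ l' k : Nat, l ≤ l' → GoodZ Z l' k →
      (k:Int) - l' ≤ (PySem.List.pyRange (l:Int) (Z.length:Int) 1).foldl
          (fun best ll =>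
            ((PySem.List.pyRange ll (Z.length:Int) 1).foldl
              (fun (p : Int × Int) rr =>
                (p.1 + PySem.List.pyGetD Z rr 0,
                 if p.1 + PySem.List.pyGetD Z rr 0 = 0 then max p.2 (rr - ll + 1) else p.2))
              (0, best)).2) b) ∧
    ((PySem.List.pyRange (l:Int) (Z.length:Int) 1).foldl
          (fun best ll =>
            ((PySem.List.pyRange ll (Z.length:Int) 1).foldl
              (fun (p : Int × Int) rr =>
                (p.1 + PySem.List.pyGetD Z rr 0,
                 if p.1 + PySem.List.pyGetD Z rr 0 = 0 then max p.2 (rr - ll + 1) else p.2))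
              (0, best)).2) b = b ∨
     ∃ l' k : Nat, GoodZ Z l' k ∧
       (PySem.List.pyRange (l:Int) (Z.length:Int) 1).foldl
          (fun best ll =>
            ((PySem.List.pyRange ll (Z.length:Int) 1).foldl
              (fun (p : Int × Int) rr =>
                (p.1 + PySem.List.pyGetD Z rr 0,
                 if p.1 + PySem.List.pyGetD Z rr 0 = 0 then max p.2 (rr - ll + 1) else p.2))
              (0, best)).2) b = (k:Int) - l') := by
  intro m
  induction m with
  | zero =>
    intro l b hl
    have hln : l = Z.length := by omega
    rw [PySem.List.pyRange_one_eq_nil (by omega), List.foldl_nil]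
    refine ⟨le_refl _, ?_, Or.inl rfl⟩
    intro l' k hl' hg
    obtain ⟨hlk, hkn, _⟩ := hg
    omega
  | succ m ih =>
    intro l b hl
    have hllt : l < Z.length := by omega
    rw [show PySem.List.pyRange (l:Int) (Z.length:Int) 1
        = (l:Int) :: PySem.List.pyRange (((l+1:Nat):Int)) (Z.length:Int) 1 by
      rw [PySem.List.pyRange_one_cons (by omega)]; push_cast; ring_nf]
    rw [List.foldl_cons]
    have hzero : ((0:Int), b) = (preZ Z l - preZ Z l, b) := by rw [sub_self]
    rw [hzero]
    obtain ⟨ina, inb, inc⟩ := inner_char Z l (Z.length - l) l b (by omega) (le_refl _)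
    set b' := ((PySem.List.pyRange ((l:Nat):Int) (Z.length:Int) 1).foldl
          (fun (p : Int × Int) rr =>
            (p.1 + PySem.List.pyGetD Z rr 0,
             if p.1 + PySem.List.pyGetD Z rr 0 = 0 then max p.2 (rr - ((l:Nat):Int) + 1) else p.2))
          (preZ Z l - preZ Z l, b)).2 with hb'
    obtain ⟨iha, ihb, ihc⟩ := ih (l+1) b' (by omega)
    refine ⟨le_trans ina iha, ?_, ?_⟩
    · intro l' k hl' hg
      rcases Nat.eq_or_lt_of_le hl' with hl'' | hl''
      · obtain ⟨hlk, hkn, hpre⟩ := hg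
        subst hl''
        exact le_trans (inb k hlk hkn hpre.symm) iha
      · exact ihb l' k hl'' hg
    · rcases ihc with h | h
      · rw [h]
        rcases inc with h2 | ⟨k, hlk, hkn, hkp, h2⟩
        · exact Or.inl h2
        · exact Or.inr ⟨l, k, ⟨hlk, hkn, hkp.symm⟩, h2⟩
      · exact Or.inr h

-- B's difference list equals the zipped difference list (when Y is long enough)
theorem Zb_eq (X Y : List Int) (hPre : X.length ≤ Y.length) :
    (PySem.List.pyRange 0 (X.length : Int) 1).map
      (fun i => PySem.List.pyGetD X i 0 - PySem.List.pyGetD Y i 0)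
      = (X.zip Y).map (fun p => p.1 - p.2) := by
  rw [PySem.List.pyRange_zero_nat]
  rw [List.map_map]
  apply List.ext_getElem
  · simp; omega
  · intro i h1 h2
    have hiX : i < X.length := by simpa using h1
    have hiY : i < Y.length := by omega
    simp only [List.getElem_map, List.getElem_range, Function.comp_apply, List.getElem_zip]
    rw [PySem.List.pyGetD_natCast, PySem.List.pyGetD_natCast,
      List.getD_eq_getElem X 0 hiX, List.getD_eq_getElem Y 0 hiY]

-- ===== VERDICT (by name: the statement is the Claim_ definition above) =====
theorem findMaxSublistLength_spec : Claim_equal_findMaxSublistLength := by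
  intro X Y _ hPre
  unfold Pre_findMaxSublistLength at hPre
  unfold Spec_findMaxSublistLength findMaxSublistLength_alt
  rw [Zb_eq X Y hPre]
  set Z := (X.zip Y).map (fun p => p.1 - p.2) with hZ
  have hZlen : Z.length = (X.zip Y).length := by simp [hZ]
  rw [A_eq_fold X Y hPre]
  -- characterise the A-side value
  have hcast1 : ((1:Nat):Int) = (1:Int) := by norm_num
  obtain ⟨fa, fb, fc⟩ := F_char Z Z.length 1 0 (by omega) (le_refl _)
  rw [hcast1] at fa fb fc
  rw [← hZlen]
  -- characterise the B-side value
  have hcast0 : ((0:Nat):Int) = (0:Int) := by norm_num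
  obtain ⟨ba, bb, bc⟩ := outer_char Z Z.length 0 0 (by omega)
  rw [hcast0] at ba bb bc
  -- both satisfy: ≥ 0, ≥ every good pair, and equal 0 or some good pair's value
  apply le_antisymm
  · rcases fc with h | h | ⟨l, k, hg, h⟩
    · rw [h]; exact ba
    · rw [h]; exact ba
    · rw [h]; exact bb l k (Nat.zero_le _) hg
  · rcases bc with h | ⟨l, k, hg, h⟩
    · rw [h]; exact fa
    · rw [h]; exact fb l k (by obtain ⟨hlk, _, _⟩ := hg; omega) hg
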